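-- pv_equiv track=rewrite | github.com/eliottcassidy2000/math | 03-artifacts/code/tournament_fast.py | find_odd_cycles_dp
-- ===== SOURCE A (Python) =====
-- def find_odd_cycles_dp(T):
--     """Find all directed odd cycles using bitmask DP.
--
--     Uses dp[(mask, v)] = # directed paths from min(mask) through exactly
--     the vertices in mask, ending at v. A cycle of length k exists when
--     there's an arc from v back to min(mask) and popcount(mask) = k.
--
--     Complexity: O(2^n * n) — much faster than permutation enumeration
--     for cycle lengths >= 7.
--
--     Returns: list of (vertex_tuple, count) where count is the number of
--     distinct directed cycles on that vertex set. Each directed cycle on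
--     the same vertex set is a separate node in Omega(T).
--     """
--     n = len(T)
--     results = []  # list of vertex tuples (one per directed cycle)
--
--     for start in range(n):
--         # dp[mask][v] = # paths from start through mask ending at v
--         # Only consider masks containing start, where start is minimum
--         dp = [[0] * n for _ in range(1 << n)]
--         dp[1 << start][start] = 1
--
--         for mask in range(1 << start, 1 << n):
--             if not (mask & (1 << start)):
--                 continue
--             # Ensure start is minimum in mask
--             if mask & ((1 << start) - 1):
--                 continue
--             popcount = bin(mask).count('1')
--             for last in range(n):
--                 if not (mask & (1 << last)):
--                     continue
--                 cnt = dp[mask][last]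
--                 if cnt == 0:
--                     continue
--
--                 # Try to close cycle (only for odd lengths >= 3)
--                 if popcount >= 3 and popcount % 2 == 1 and last != start:
--                     if T[last][start]:
--                         # Found cnt directed cycles on this vertex set
--                         verts = tuple(i for i in range(n) if mask & (1 << i))
--                         for _ in range(cnt):
--                             results.append(verts)
--
--                 # Extend path
--                 if popcount < n:
--                     for nxt in range(start + 1, n):
--                         if mask & (1 << nxt):
--                             continue
--                         if T[last][nxt]:
--                             dp[mask | (1 << nxt)][nxt] += cnt
--
--         # Clear to save memory
--         dp = None
--
--     return results
-- ===== SOURCE B (Python) =====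
-- def find_odd_cycles_dp(T):
--     """Memoized-recursion reformulation: count_paths(mask, last) counts directed
--     paths from `start` through exactly the vertices of `mask`, ending at `last`;
--     only masks whose popcount is odd and >= 3 are ever examined."""
--     n = len(T)
--     results = []
--     for start in range(n):
--         memo = {}
--
--         def count_paths(mask, last):
--             if mask == (1 << start):
--                 return 1 if last == start else 0
--             if last == start or not (mask >> last) & 1:
--                 return 0
--             key = (mask, last)
--             if key in memo:
--                 return memo[key]
--             prev_mask = mask ^ (1 << last)
--             total = 0
--             for prev in range(n):
--                 if (prev_mask >> prev) & 1 and T[prev][last]: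
--                     total += count_paths(prev_mask, prev)
--             memo[key] = total
--             return total
--
--         for mask in range(1 << start, 1 << n):
--             if not (mask >> start) & 1 or mask & ((1 << start) - 1):
--                 continue
--             pc = bin(mask).count("1")
--             if pc < 3 or pc % 2 == 0:
--                 continue
--             verts = tuple(i for i in range(n) if (mask >> i) & 1)
--             for last in range(n):
--                 if last == start or not (mask >> last) & 1:
--                     continue
--                 if T[last][start]:
--                     results.extend([verts] * count_paths(mask, last))
--     return results
-- ===== Notes on version B (the rewrite author's own statement) =====
-- stated objective: alternative
-- what changed: Replaces the forward-filling dp[mask][last] table (allocated over all 2^n masks per start) with a memoized recursive count_paths(mask,last) evaluated lazily, and only for masks of odd popcount >= 3 with lowest bit start, reproducing A's (start, mask, last) output order.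
-- outside the precondition, e.g. on find_odd_cycles_dp([[0, 0, 0], [0, 0, 0], [0, 0]]): A returns [], B returns []
import Mathlib
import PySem

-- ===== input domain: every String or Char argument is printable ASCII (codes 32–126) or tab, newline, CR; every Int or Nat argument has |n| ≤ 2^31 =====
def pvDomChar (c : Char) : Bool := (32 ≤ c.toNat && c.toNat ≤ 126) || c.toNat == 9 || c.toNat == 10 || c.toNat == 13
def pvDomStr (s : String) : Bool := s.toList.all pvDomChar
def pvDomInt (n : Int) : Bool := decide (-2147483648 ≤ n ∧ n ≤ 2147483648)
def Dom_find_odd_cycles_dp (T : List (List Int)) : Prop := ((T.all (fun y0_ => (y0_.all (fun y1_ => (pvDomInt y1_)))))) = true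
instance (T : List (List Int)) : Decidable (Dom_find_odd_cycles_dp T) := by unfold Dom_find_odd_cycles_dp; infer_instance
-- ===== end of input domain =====

-- B replaces A's forward-filling dp table over all 2^n masks by a memoized recursive
-- count_paths(mask, last), evaluated only for masks with odd popcount ≥ 3; same output.

-- ===== PORT A =====
-- popcount: port of `bin(mask).count('1')`
def pyPopcount (m : Nat) : Nat :=
  if h : m = 0 then 0
  else m % 2 + pyPopcount (m / 2)
decreasing_by exact Nat.div_lt_self (Nat.pos_of_ne_zero h) (by omega)

-- the table dp[mask][v] is represented as a function Nat → Nat → Int updated pointwise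
-- (all Python indices are in range under Pre_, so this is the same table).
-- inner `for nxt in range(start+1, n)` loop body
def stepNxtA (T : List (List Int)) (mask last : Nat) (cnt : Int)
    (dp : Nat → Nat → Int) (nxt : Nat) : Nat → Nat → Int :=
  if mask.testBit nxt then dp
  else if (T.getD last []).getD nxt 0 ≠ 0 then   -- T[last][nxt] (in range under Pre_)
    fun m2 v => if m2 = mask ||| 2 ^ nxt ∧ v = nxt then dp m2 v + cnt else dp m2 v
  else dp

-- `for last in range(n)` loop body; state = (dp, results)
def stepLastA (T : List (List Int)) (n start mask popcount : Nat)
    (st : (Nat → Nat → Int) × List (List Int)) (last : Nat) :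
    (Nat → Nat → Int) × List (List Int) :=
  if ¬ mask.testBit last then st
  else
    let cnt := st.1 mask last
    if cnt = 0 then st
    else
      let results :=
        if 3 ≤ popcount ∧ popcount % 2 = 1 ∧ last ≠ start then
          if (T.getD last []).getD start 0 ≠ 0 then   -- T[last][start] (in range under Pre_)
            -- `for _ in range(cnt): results.append(verts)` (cnt > 0 here)
            st.2 ++ List.replicate cnt.toNat
              (((List.range n).filter (fun i => mask.testBit i)).map (fun i => (i : Int)))
          else st.2
        else st.2
      let dp :=
        if popcount < n then
          (List.range' (start + 1) (n - (start + 1))).foldl (stepNxtA T mask last cnt) st.1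
        else st.1
      (dp, results)

-- `for mask in range(1 << start, 1 << n)` loop body
def stepMaskA (T : List (List Int)) (n start : Nat)
    (st : (Nat → Nat → Int) × List (List Int)) (mask : Nat) :
    (Nat → Nat → Int) × List (List Int) :=
  if ¬ mask.testBit start then st
  else if mask % 2 ^ start ≠ 0 then st
  else (List.range n).foldl (stepLastA T n start mask (pyPopcount mask)) st

def find_odd_cycles_dp (T : List (List Int)) : List (List Int) :=
  let n := T.length
  (List.range n).foldl (fun results start =>
    -- dp = all zeros, then dp[1 << start][start] = 1
    let dp : Nat → Nat → Int := fun _ _ => 0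
    let dp : Nat → Nat → Int := fun mask v => if mask = 2 ^ start ∧ v = start then 1 else dp mask v
    ((List.range' (2 ^ start) (2 ^ n - 2 ^ start)).foldl (stepMaskA T n start) (dp, results)).2) []

-- ===== PORT B =====
-- removing a set bit makes the mask smaller (termination of count_paths' recursion)
theorem xor_two_pow_lt {m i : Nat} (h : m.testBit i = true) : m ^^^ 2 ^ i < m := by
  refine Nat.lt_of_testBit i ?_ h ?_
  · simp [Nat.testBit_xor, h]
  · intro j hj
    have hd : decide (i = j) = false := by simp; omega
    simp [Nat.testBit_xor, Nat.testBit_two_pow, hd]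

-- count_paths(mask, last) from Source B; the memo dict becomes plain well-founded recursion;
-- cpSum is the accumulator loop `for prev in range(n): total += …`.
mutual
  def cpB (T : List (List Int)) (n start mask last : Nat) : Int :=
    if mask = 2 ^ start then (if last = start then 1 else 0)
    else if h : last = start ∨ ¬ mask.testBit last then 0
    else cpSum T n start (mask ^^^ 2 ^ last) last (List.range n) 0
  termination_by (2 * mask, 0)
  decreasing_by
    have hb : mask.testBit last = true := by
      by_contra h'
      exact h (Or.inr h')
    have := xor_two_pow_lt hb
    exact Prod.Lex.left _ _ (by omega)

  def cpSum (T : List (List Int)) (n start pm last : Nat) (l : List Nat) (total : Int) : Int :=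
    match l with
    | [] => total
    | prev :: rest =>
      cpSum T n start pm last rest
        (if pm.testBit prev ∧ (T.getD prev []).getD last 0 ≠ 0 then
          total + cpB T n start pm prev
        else total)
  termination_by (2 * pm + 1, l.length)
  decreasing_by
    · exact Prod.Lex.left _ _ (by omega)
    · exact Prod.Lex.right _ (by simp [List.length_cons])
end

def stepLastB (T : List (List Int)) (n start mask : Nat) (verts : List Int)
    (results : List (List Int)) (last : Nat) : List (List Int) :=
  if last = start ∨ ¬ mask.testBit last then results
  else if (T.getD last []).getD start 0 ≠ 0 then
    results ++ List.replicate (cpB T n start mask last).toNat verts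
  else results

def stepMaskB (T : List (List Int)) (n start : Nat)
    (results : List (List Int)) (mask : Nat) : List (List Int) :=
  if ¬ mask.testBit start ∨ mask % 2 ^ start ≠ 0 then results
  else
    let pc := pyPopcount mask
    if pc < 3 ∨ pc % 2 = 0 then results
    else
      let verts := ((List.range n).filter (fun i => mask.testBit i)).map (fun i => (i : Int))
      (List.range n).foldl (stepLastB T n start mask verts) results

def find_odd_cycles_dp_alt (T : List (List Int)) : List (List Int) :=
  let n := T.length
  (List.range n).foldl (fun results start =>
    (List.range' (2 ^ start) (2 ^ n - 2 ^ start)).foldl (stepMaskB T n start) results) []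

-- ===== PRECONDITION & SPEC =====
-- Pre_ excludes the inputs on which A's row indexing T[last][start] / T[last][nxt]
-- raises IndexError (rows shorter than n, except the n ≤ 1 cases and the n = 2 case,
-- where only row 0 up to index 1 is ever read); a few degenerate short-row inputs on
-- which the offending entry happens never to be reached still return [] and are excluded.
def Pre_find_odd_cycles_dp (T : List (List Int)) : Prop :=
  T.length ≤ 1 ∨ (T.length = 2 ∧ 2 ≤ (T.getD 0 []).length) ∨ ∀ row ∈ T, T.length ≤ row.length
instance (T : List (List Int)) : Decidable (Pre_find_odd_cycles_dp T) := by
  unfold Pre_find_odd_cycles_dp; infer_instance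
def pvWitness_find_odd_cycles_dp : List (List Int) := [[0, 1, 0], [0, 0, 1], [1, 0, 0]]

def Spec_find_odd_cycles_dp (T : List (List Int)) (out : List (List Int)) : Prop := out = find_odd_cycles_dp_alt T
instance (T : List (List Int)) (out : List (List Int)) : Decidable (Spec_find_odd_cycles_dp T out) := by unfold Spec_find_odd_cycles_dp; infer_instance

-- ===== CLAIM (what is proved, stated in full; the proofs are below) =====
def Claim_equal_find_odd_cycles_dp : Prop := ∀ (T : List (List Int)), Dom_find_odd_cycles_dp T → Pre_find_odd_cycles_dp T → Spec_find_odd_cycles_dp T (find_odd_cycles_dp T)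

-- ===== LEMMAS AND PROOFS =====

-- A's dp table at the moment mask `m` is about to be processed
def dpAt (T : List (List Int)) (start m : Nat) : Nat → Nat → Int :=
  fun mask2 v =>
    (if mask2 = 2 ^ start ∧ v = start then 1 else 0) +
    (if mask2 < 2 ^ T.length ∧ v < T.length ∧ start < v ∧ mask2.testBit v = true ∧
        (mask2 ^^^ 2 ^ v).testBit start = true ∧ (mask2 ^^^ 2 ^ v) % 2 ^ start = 0 ∧
        mask2 ^^^ 2 ^ v < m then
      cpSum T T.length start (mask2 ^^^ 2 ^ v) v (List.range T.length) 0
    else 0)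

-- A's dp table mid-way through mask m's last-loop: k lasts processed
def dpMid (T : List (List Int)) (start m k : Nat) : Nat → Nat → Int :=
  fun mask2 v =>
    dpAt T start m mask2 v +
    (if pyPopcount m < T.length ∧ start < v ∧ v < T.length ∧ m.testBit v = false ∧
        mask2 = m ||| 2 ^ v then
      cpSum T T.length start m v (List.range k) 0
    else 0)

theorem mod_two_pow_eq_zero_iff (m k : Nat) :
    m % 2 ^ k = 0 ↔ ∀ i, i < k → m.testBit i = false := by
  constructor
  · intro h i hi
    have h2 := Nat.testBit_mod_two_pow m k i
    rw [h, Nat.zero_testBit] at h2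
    simpa [hi] using h2.symm
  · intro h
    apply Nat.eq_of_testBit_eq
    intro i
    rw [Nat.testBit_mod_two_pow, Nat.zero_testBit]
    by_cases hi : i < k
    · simp [hi, h i hi]
    · simp [hi]

theorem testBit_le {start mask : Nat} (h : mask.testBit start = true) : 2 ^ start ≤ mask := by
  by_contra h2
  have := Nat.testBit_lt_two_pow (by omega : mask < 2 ^ start)
  rw [h] at this
  simp at this

theorem low_bit_zero {start mask i : Nat} (h : mask % 2 ^ start = 0) (hi : i < start) :
    mask.testBit i = false := (mod_two_pow_eq_zero_iff mask start).mp h i hi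

theorem xor_bit_high {start v : Nat} (mask : Nat) (hv : start < v) :
    (mask ^^^ 2 ^ v).testBit start = mask.testBit start := by
  have hd : decide (v = start) = false := by simp; omega
  simp [Nat.testBit_xor, Nat.testBit_two_pow, hd]

theorem xor_mod_high {start v : Nat} (mask : Nat) (hv : start < v) :
    (mask ^^^ 2 ^ v) % 2 ^ start = mask % 2 ^ start := by
  apply Nat.eq_of_testBit_eq
  intro i
  rw [Nat.testBit_mod_two_pow, Nat.testBit_mod_two_pow]
  by_cases hi : i < start
  · have hd : decide (v = i) = false := by simp; omega
    simp [Nat.testBit_xor, Nat.testBit_two_pow, hd, hi]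
  · simp [hi]

-- removing the added bit gives back the mask
theorem or_xor_cancel {mask v : Nat} (h : mask.testBit v = false) :
    (mask ||| 2 ^ v) ^^^ 2 ^ v = mask := by
  apply Nat.eq_of_testBit_eq
  intro i
  by_cases hiv : v = i
  · subst hiv
    simp [Nat.testBit_xor, Nat.testBit_or, h]
  · have hd : decide (v = i) = false := by simp [hiv]
    simp [Nat.testBit_xor, Nat.testBit_or, Nat.testBit_two_pow, hd]

theorem xor_or_cancel {mask2 v : Nat} (h : mask2.testBit v = true) :
    (mask2 ^^^ 2 ^ v) ||| 2 ^ v = mask2 := by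
  apply Nat.eq_of_testBit_eq
  intro i
  by_cases hiv : v = i
  · subst hiv
    simp [Nat.testBit_xor, Nat.testBit_or, h]
  · have hd : decide (v = i) = false := by simp [hiv]
    simp [Nat.testBit_xor, Nat.testBit_or, Nat.testBit_two_pow, hd]

theorem or_ne_self {mask v : Nat} (h : mask.testBit v = false) : mask ||| 2 ^ v ≠ mask := by
  intro he
  have : (mask ||| 2 ^ v).testBit v = mask.testBit v := by rw [he]
  simp [Nat.testBit_or, h] at this

theorem or_bit_self {mask v : Nat} : (mask ||| 2 ^ v).testBit v = true := by
  simp [Nat.testBit_or]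

theorem pyPopcount_eq (n : Nat) : ∀ m, m < 2 ^ n →
    pyPopcount m = ((List.range n).filter (fun i => m.testBit i)).length := by
  induction n with
  | zero =>
    intro m hm
    have hm0 : m = 0 := by omega
    subst hm0
    rw [pyPopcount]
    simp
  | succ n ih =>
    intro m hm
    by_cases hm0 : m = 0
    · subst hm0
      rw [pyPopcount]
      simp [Nat.zero_testBit]
    · rw [pyPopcount, dif_neg hm0]
      have h2 : (2 : Nat) ^ (n + 1) = 2 ^ n * 2 := by ring
      have hdiv : m / 2 < 2 ^ n := Nat.div_lt_of_lt_mul (by omega)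
      rw [ih (m / 2) hdiv, List.range_succ_eq_map, List.filter_cons, List.filter_map]
      have hpred : (fun i => m.testBit i) ∘ Nat.succ = fun i => (m / 2).testBit i := by
        funext i
        simp [Function.comp, Nat.testBit_succ]
      rw [hpred]
      by_cases hb0 : m.testBit 0 = true
      · have : m % 2 = 1 := by
          have h4 := Nat.testBit_zero m
          rw [hb0] at h4
          exact of_decide_eq_true h4.symm
        simp [hb0, this]
        omega
      · have hb0' : m.testBit 0 = false := by simpa using hb0
        have : m % 2 = 0 := by
          have h4 := Nat.testBit_zero m
          rw [hb0'] at h4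
          have h3 := of_decide_eq_false h4.symm
          omega
        simp [hb0', this]

theorem filter_len_lt {p : Nat → Bool} : ∀ (l : List Nat) (v : Nat), v ∈ l → p v = false →
    (l.filter p).length < l.length := by
  intro l
  induction l with
  | nil => simp
  | cons a t ih =>
    intro v hv hp
    rw [List.filter_cons]
    rcases List.mem_cons.mp hv with h | h
    · subst h
      rw [hp]
      have hle := List.length_filter_le p t
      simp only [Bool.false_eq_true, if_false, List.length_cons]
      omega
    · by_cases hpa : p a = true
      · rw [if_pos hpa]
        simp only [List.length_cons]
        exact Nat.succ_lt_succ (ih v h hp)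
      · rw [if_neg hpa]
        simp only [List.length_cons]
        have := ih v h hp
        omega

theorem pyPopcount_lt {n m v : Nat} (hm : m < 2 ^ n) (hv : v < n)
    (hb : m.testBit v = false) : pyPopcount m < n := by
  rw [pyPopcount_eq n m hm]
  have := filter_len_lt (List.range n) v (by simpa using hv) hb
  simpa using this

theorem cpSum_append (T : List (List Int)) (n start pm last : Nat) (l1 l2 : List Nat)
    (t : Int) : cpSum T n start pm last (l1 ++ l2) t
      = cpSum T n start pm last l2 (cpSum T n start pm last l1 t) := by
  induction l1 generalizing t with
  | nil => simp [cpSum]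
  | cons a l ih =>
    simp only [List.cons_append, cpSum]
    rw [ih]

theorem cpSum_snoc (T : List (List Int)) (n start pm last j : Nat) :
    cpSum T n start pm last (List.range (j + 1)) 0
      = cpSum T n start pm last (List.range j) 0 +
        (if pm.testBit j ∧ (T.getD j []).getD last 0 ≠ 0 then cpB T n start pm j else 0) := by
  rw [List.range_succ, cpSum_append]
  generalize cpSum T n start pm last (List.range j) 0 = t
  show cpSum _ _ _ _ _ [j] t = _
  rw [cpSum, cpSum]
  split_ifs <;> ring

theorem stepNxtA_apply (T : List (List Int)) (mask last : Nat) (cnt : Int)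
    (dp : Nat → Nat → Int) (nxt mask2 v : Nat) :
    stepNxtA T mask last cnt dp nxt mask2 v =
      if mask.testBit nxt then dp mask2 v
      else if (T.getD last []).getD nxt 0 ≠ 0 then
        (if mask2 = mask ||| 2 ^ nxt ∧ v = nxt then dp mask2 v + cnt else dp mask2 v)
      else dp mask2 v := by
  unfold stepNxtA
  split_ifs with h1 h2 h3
  · rfl
  · show (if mask2 = mask ||| 2 ^ nxt ∧ v = nxt then dp mask2 v + cnt else dp mask2 v)
      = dp mask2 v + cnt
    exact if_pos h3
  · show (if mask2 = mask ||| 2 ^ nxt ∧ v = nxt then dp mask2 v + cnt else dp mask2 v)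
      = dp mask2 v
    exact if_neg h3
  · rfl

theorem stepLastA_apply (T : List (List Int)) (n start mask pc : Nat)
    (dp : Nat → Nat → Int) (rs : List (List Int)) (last : Nat) :
    stepLastA T n start mask pc (dp, rs) last =
      if ¬ mask.testBit last then (dp, rs)
      else if dp mask last = 0 then (dp, rs)
      else
        ((if pc < n then
            (List.range' (start + 1) (n - (start + 1))).foldl
              (stepNxtA T mask last (dp mask last)) dp
          else dp),
         (if 3 ≤ pc ∧ pc % 2 = 1 ∧ last ≠ start then
            if (T.getD last []).getD start 0 ≠ 0 then
              rs ++ List.replicate (dp mask last).toNat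
                (((List.range n).filter (fun i => mask.testBit i)).map (fun i => (i : Int)))
            else rs
          else rs)) := rfl

theorem dpMid_succ (T : List (List Int)) (start m k mask2 v : Nat) :
    dpMid T start m (k + 1) mask2 v =
      dpMid T start m k mask2 v +
        (if (pyPopcount m < T.length ∧ start < v ∧ v < T.length ∧ m.testBit v = false ∧
        mask2 = m ||| 2 ^ v) ∧
            (m.testBit k = true ∧ (T.getD k []).getD v 0 ≠ 0) then
          cpB T T.length start m k
        else 0) := by
  simp only [dpMid]
  rw [cpSum_snoc]
  by_cases hC : pyPopcount m < T.length ∧ start < v ∧ v < T.length ∧ m.testBit v = false ∧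
        mask2 = m ||| 2 ^ v
  · rw [if_pos hC, if_pos hC]
    by_cases hb : m.testBit k = true ∧ (T.getD k []).getD v 0 ≠ 0
    · rw [if_pos hb, if_pos ⟨hC, hb⟩]
      ring
    · have hb2 : ¬((pyPopcount m < T.length ∧ start < v ∧ v < T.length ∧ m.testBit v = false ∧
        mask2 = m ||| 2 ^ v) ∧
          (m.testBit k = true ∧ (T.getD k []).getD v 0 ≠ 0)) := fun h => hb h.2
      rw [if_neg hb, if_neg hb2]
      ring
  · have hb2 : ¬((pyPopcount m < T.length ∧ start < v ∧ v < T.length ∧ m.testBit v = false ∧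
        mask2 = m ||| 2 ^ v) ∧
        (m.testBit k = true ∧ (T.getD k []).getD v 0 ≠ 0)) := fun h => hC h.1
    rw [if_neg hC, if_neg hC, if_neg hb2]
    ring

-- dp value once the loop reaches the mask itself: final, and equal to B's count_paths
theorem dpAt_self (T : List (List Int)) (start mask2 v : Nat)
    (hb : mask2.testBit start = true) (hmod : mask2 % 2 ^ start = 0)
    (hlt : mask2 < 2 ^ T.length) (hv : v < T.length) :
    dpAt T start mask2 mask2 v = cpB T T.length start mask2 v := by
  rw [cpB]
  simp only [dpAt]
  by_cases h1 : mask2 = 2 ^ start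
  · rw [if_pos h1]
    have hcond : ¬(mask2 < 2 ^ T.length ∧ v < T.length ∧ start < v ∧ mask2.testBit v = true ∧
        (mask2 ^^^ 2 ^ v).testBit start = true ∧ (mask2 ^^^ 2 ^ v) % 2 ^ start = 0 ∧
        mask2 ^^^ 2 ^ v < mask2) := by
      rintro ⟨-, -, hsv, hbv, -⟩
      rw [h1, Nat.testBit_two_pow] at hbv
      have : start = v := of_decide_eq_true hbv
      omega
    rw [if_neg hcond]
    by_cases h2 : v = start
    · simp [h1, h2]
    · simp [h1, h2]
  · rw [if_neg h1]
    by_cases h2 : v = start ∨ ¬ mask2.testBit v = true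
    · rw [dif_pos h2]
      have hcond : ¬(mask2 < 2 ^ T.length ∧ v < T.length ∧ start < v ∧ mask2.testBit v = true ∧
        (mask2 ^^^ 2 ^ v).testBit start = true ∧ (mask2 ^^^ 2 ^ v) % 2 ^ start = 0 ∧
        mask2 ^^^ 2 ^ v < mask2) := by
        rintro ⟨-, -, hsv, hbv, -⟩
        rcases h2 with h2 | h2
        · omega
        · exact h2 hbv
      rw [if_neg hcond]
      simp [h1]
    · rw [dif_neg h2]
      push_neg at h2
      obtain ⟨hvs, hbv⟩ := h2
      have hbv' : mask2.testBit v = true := by simpa using hbv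
      have hsv : start < v := by
        rcases Nat.lt_trichotomy v start with h | h | h
        · have hlow := low_bit_zero hmod h
          rw [hbv'] at hlow
          exact absurd hlow (by simp)
        · exact absurd h hvs
        · exact h
      have hcond : mask2 < 2 ^ T.length ∧ v < T.length ∧ start < v ∧ mask2.testBit v = true ∧
        (mask2 ^^^ 2 ^ v).testBit start = true ∧ (mask2 ^^^ 2 ^ v) % 2 ^ start = 0 ∧
        mask2 ^^^ 2 ^ v < mask2 := by
        refine ⟨hlt, hv, hsv, hbv', ?_, ?_, xor_two_pow_lt hbv'⟩
        · rw [xor_bit_high mask2 hsv]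
          exact hb
        · rw [xor_mod_high mask2 hsv]
          exact hmod
      rw [if_pos hcond]
      simp [h1]

theorem dpMid_self (T : List (List Int)) (start m k v : Nat) :
    dpMid T start m k m v = dpAt T start m m v := by
  simp only [dpMid]
  have h : ¬(pyPopcount m < T.length ∧ start < v ∧ v < T.length ∧ m.testBit v = false ∧
      m = m ||| 2 ^ v) := by
    rintro ⟨-, -, -, hbv, he⟩
    exact or_ne_self hbv he.symm
  rw [if_neg h, add_zero]

-- the nxt-extension loop, characterised (applied form)
theorem nxtFold (T : List (List Int)) (m k : Nat) (cnt : Int) :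
    ∀ (len a : Nat) (dp : Nat → Nat → Int) (mask2 v : Nat),
      ((List.range' a len).foldl (stepNxtA T m k cnt) dp) mask2 v
        = dp mask2 v + (if a ≤ v ∧ v < a + len ∧ m.testBit v = false ∧
        (T.getD k []).getD v 0 ≠ 0 ∧ mask2 = m ||| 2 ^ v then cnt else 0) := by
  intro len
  induction len with
  | zero =>
    intro a dp mask2 v
    have h : ¬(a ≤ v ∧ v < a + 0 ∧ m.testBit v = false ∧
        (T.getD k []).getD v 0 ≠ 0 ∧ mask2 = m ||| 2 ^ v) := by
      rintro ⟨h1, h2, -⟩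
      omega
    rw [List.range'_zero, List.foldl_nil, if_neg h, add_zero]
  | succ len ih =>
    intro a dp mask2 v
    rw [List.range'_succ, List.foldl_cons, ih, stepNxtA_apply]
    by_cases hba : m.testBit a = true
    · rw [if_pos hba]
      by_cases hc : (a + 1) ≤ v ∧ v < (a + 1) + len ∧ m.testBit v = false ∧
        (T.getD k []).getD v 0 ≠ 0 ∧ mask2 = m ||| 2 ^ v
      · obtain ⟨h1, h2, h3, h4, h5⟩ := hc
        have hc2 : a ≤ v ∧ v < a + (len + 1) ∧ m.testBit v = false ∧
        (T.getD k []).getD v 0 ≠ 0 ∧ mask2 = m ||| 2 ^ v := ⟨by omega, by omega, h3, h4, h5⟩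
        rw [if_pos ⟨h1, h2, h3, h4, h5⟩, if_pos hc2]
      · rw [if_neg hc]
        have hc2 : ¬(a ≤ v ∧ v < a + (len + 1) ∧ m.testBit v = false ∧
        (T.getD k []).getD v 0 ≠ 0 ∧ mask2 = m ||| 2 ^ v) := by
          rintro ⟨h1, h2, h3, h4, h5⟩
          have hva : v ≠ a := by
            intro he
            rw [he, hba] at h3
            cases h3
          exact hc ⟨by omega, by omega, h3, h4, h5⟩
        rw [if_neg hc2]
    · rw [if_neg hba]
      have hba' : m.testBit a = false := by simpa using hba
      by_cases hrow : (T.getD k []).getD a 0 ≠ 0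
      · rw [if_pos hrow]
        by_cases hkey : mask2 = m ||| 2 ^ a ∧ v = a
        · rw [if_pos hkey]
          obtain ⟨hm2, hva⟩ := hkey
          have hc1 : ¬((a + 1) ≤ v ∧ v < (a + 1) + len ∧ m.testBit v = false ∧
        (T.getD k []).getD v 0 ≠ 0 ∧ mask2 = m ||| 2 ^ v) := by
            rintro ⟨h1, -⟩
            omega
          have hc2 : a ≤ v ∧ v < a + (len + 1) ∧ m.testBit v = false ∧
        (T.getD k []).getD v 0 ≠ 0 ∧ mask2 = m ||| 2 ^ v := by
            subst hva
            exact ⟨le_rfl, by omega, hba', hrow, hm2⟩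
          rw [if_neg hc1, if_pos hc2]
          ring
        · rw [if_neg hkey]
          by_cases hc : (a + 1) ≤ v ∧ v < (a + 1) + len ∧ m.testBit v = false ∧
        (T.getD k []).getD v 0 ≠ 0 ∧ mask2 = m ||| 2 ^ v
          · obtain ⟨h1, h2, h3, h4, h5⟩ := hc
            have hc2 : a ≤ v ∧ v < a + (len + 1) ∧ m.testBit v = false ∧
        (T.getD k []).getD v 0 ≠ 0 ∧ mask2 = m ||| 2 ^ v := ⟨by omega, by omega, h3, h4, h5⟩
            rw [if_pos ⟨h1, h2, h3, h4, h5⟩, if_pos hc2]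
          · rw [if_neg hc]
            have hc2 : ¬(a ≤ v ∧ v < a + (len + 1) ∧ m.testBit v = false ∧
        (T.getD k []).getD v 0 ≠ 0 ∧ mask2 = m ||| 2 ^ v) := by
              rintro ⟨h1, h2, h3, h4, h5⟩
              have hva : v ≠ a := by
                intro he
                exact hkey ⟨by rw [← he]; exact h5, he⟩
              exact hc ⟨by omega, by omega, h3, h4, h5⟩
            rw [if_neg hc2]
      · rw [if_neg hrow]
        by_cases hc : (a + 1) ≤ v ∧ v < (a + 1) + len ∧ m.testBit v = false ∧
        (T.getD k []).getD v 0 ≠ 0 ∧ mask2 = m ||| 2 ^ v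
        · obtain ⟨h1, h2, h3, h4, h5⟩ := hc
          have hc2 : a ≤ v ∧ v < a + (len + 1) ∧ m.testBit v = false ∧
        (T.getD k []).getD v 0 ≠ 0 ∧ mask2 = m ||| 2 ^ v := ⟨by omega, by omega, h3, h4, h5⟩
          rw [if_pos ⟨h1, h2, h3, h4, h5⟩, if_pos hc2]
        · rw [if_neg hc]
          have hc2 : ¬(a ≤ v ∧ v < a + (len + 1) ∧ m.testBit v = false ∧
        (T.getD k []).getD v 0 ≠ 0 ∧ mask2 = m ||| 2 ^ v) := by
            rintro ⟨h1, h2, h3, h4, h5⟩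
            have hva : v ≠ a := by
              intro he
              rw [he] at h4
              exact hrow h4
            exact hc ⟨by omega, by omega, h3, h4, h5⟩
          rw [if_neg hc2]

-- dp-table transitions of one last-iteration, packaged
theorem dpMid_succ_zero (T : List (List Int)) (start m k : Nat)
    (h : cpB T T.length start m k = 0) :
    dpMid T start m (k + 1) = dpMid T start m k := by
  funext mask2 v
  rw [dpMid_succ]
  by_cases hcd : (pyPopcount m < T.length ∧ start < v ∧ v < T.length ∧ m.testBit v = false ∧
        mask2 = m ||| 2 ^ v) ∧
      (m.testBit k = true ∧ (T.getD k []).getD v 0 ≠ 0)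
  · rw [if_pos hcd, h, add_zero]
  · rw [if_neg hcd, add_zero]

theorem dpMid_succ_nobit (T : List (List Int)) (start m k : Nat)
    (h : m.testBit k = false) :
    dpMid T start m (k + 1) = dpMid T start m k := by
  funext mask2 v
  rw [dpMid_succ]
  have hcd : ¬((pyPopcount m < T.length ∧ start < v ∧ v < T.length ∧ m.testBit v = false ∧
        mask2 = m ||| 2 ^ v) ∧
      (m.testBit k = true ∧ (T.getD k []).getD v 0 ≠ 0)) := by
    rintro ⟨-, hbb, -⟩
    rw [h] at hbb
    cases hbb
  rw [if_neg hcd, add_zero]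

theorem dpExt (T : List (List Int)) (start m k : Nat) (hbk : m.testBit k = true) :
    (if pyPopcount m < T.length then
        (List.range' (start + 1) (T.length - (start + 1))).foldl
          (stepNxtA T m k (cpB T T.length start m k)) (dpMid T start m k)
      else dpMid T start m k) = dpMid T start m (k + 1) := by
  by_cases hpc : pyPopcount m < T.length
  · rw [if_pos hpc]
    funext mask2 v
    rw [nxtFold, dpMid_succ]
    by_cases hcd : (pyPopcount m < T.length ∧ start < v ∧ v < T.length ∧ m.testBit v = false ∧
        mask2 = m ||| 2 ^ v) ∧
        (m.testBit k = true ∧ (T.getD k []).getD v 0 ≠ 0)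
    · obtain ⟨⟨c1, c2, c3, c4, c5⟩, c6, c7⟩ := hcd
      have hcn : start + 1 ≤ v ∧ v < start + 1 + (T.length - (start + 1)) ∧
          m.testBit v = false ∧ (T.getD k []).getD v 0 ≠ 0 ∧
          mask2 = m ||| 2 ^ v := ⟨by omega, by omega, c4, c7, c5⟩
      rw [if_pos hcn, if_pos ⟨⟨c1, c2, c3, c4, c5⟩, c6, c7⟩]
    · rw [if_neg hcd]
      have hcn : ¬(start + 1 ≤ v ∧ v < start + 1 + (T.length - (start + 1)) ∧
          m.testBit v = false ∧ (T.getD k []).getD v 0 ≠ 0 ∧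
          mask2 = m ||| 2 ^ v) := by
        rintro ⟨h1, h2, h3, h4, h5⟩
        exact hcd ⟨⟨hpc, by omega, by omega, h3, h5⟩, hbk, h4⟩
      rw [if_neg hcn, add_zero]
  · rw [if_neg hpc]
    funext mask2 v
    rw [dpMid_succ]
    have hcd : ¬((pyPopcount m < T.length ∧ start < v ∧ v < T.length ∧ m.testBit v = false ∧
        mask2 = m ||| 2 ^ v) ∧
        (m.testBit k = true ∧ (T.getD k []).getD v 0 ≠ 0)) := by
      rintro ⟨⟨h1, -⟩, -⟩
      exact hpc h1
    rw [if_neg hcd, add_zero]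

-- the last-loop, characterised
theorem innerFold (T : List (List Int)) (start m : Nat) (hb : m.testBit start = true)
    (hmod : m % 2 ^ start = 0) (hm : m < 2 ^ T.length)
    (res : List (List Int)) :
    ∀ k, k ≤ T.length →
      (List.range k).foldl (stepLastA T T.length start m (pyPopcount m)) (dpAt T start m, res)
        = (dpMid T start m k,
           if 3 ≤ pyPopcount m ∧ pyPopcount m % 2 = 1 then
             (List.range k).foldl
               (stepLastB T T.length start m
                 (((List.range T.length).filter (fun i => m.testBit i)).map (fun i => (i : Int))))
               res
           else res) := by
  intro k
  induction k with
  | zero =>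
    intro hk
    rw [List.range_zero, List.foldl_nil, List.foldl_nil]
    refine Prod.ext ?_ ?_
    · show dpAt T start m = dpMid T start m 0
      funext mask2 v
      simp only [dpMid]
      rw [List.range_zero, cpSum]
      split_ifs <;> ring
    · show res = if 3 ≤ pyPopcount m ∧ pyPopcount m % 2 = 1 then res else res
      split_ifs <;> rfl
  | succ k ih =>
    intro hk
    have hk' : k ≤ T.length := by omega
    have hkn : k < T.length := by omega
    rw [List.range_succ, List.foldl_append, List.foldl_append, ih hk',
      List.foldl_cons, List.foldl_nil, List.foldl_cons, List.foldl_nil]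
    have hcnt : dpMid T start m k m k = cpB T T.length start m k := by
      rw [dpMid_self]
      exact dpAt_self T start m k hb hmod hm hkn
    by_cases hpcc : 3 ≤ pyPopcount m ∧ pyPopcount m % 2 = 1
    · rw [if_pos hpcc, if_pos hpcc, stepLastA_apply, hcnt]
      by_cases hbk : m.testBit k = true
      · rw [if_neg (not_not_intro hbk)]
        by_cases hc0 : cpB T T.length start m k = 0
        · rw [if_pos hc0]
          refine Prod.ext ?_ ?_
          · show dpMid T start m k = dpMid T start m (k + 1)
            exact (dpMid_succ_zero T start m k hc0).symm
          · show _ = stepLastB T T.length start m _ _ k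
            unfold stepLastB
            by_cases hks : k = start
            · rw [if_pos (Or.inl hks)]
            · have hg : ¬(k = start ∨ ¬ m.testBit k = true) := by
                rintro (h | h)
                · exact hks h
                · exact h hbk
              rw [if_neg hg]
              split_ifs with hrow
              · rw [hc0]
                simp
              · rfl
        · rw [if_neg hc0]
          refine Prod.ext ?_ ?_
          · show (if pyPopcount m < T.length then
                (List.range' (start + 1) (T.length - (start + 1))).foldl
                  (stepNxtA T m k (cpB T T.length start m k)) (dpMid T start m k)
              else dpMid T start m k) = dpMid T start m (k + 1)
            exact dpExt T start m k hbk
          · show (if 3 ≤ pyPopcount m ∧ pyPopcount m % 2 = 1 ∧ k ≠ start then _ else _)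
              = stepLastB T T.length start m _ _ k
            unfold stepLastB
            by_cases hks : k = start
            · have hg1 : ¬(3 ≤ pyPopcount m ∧ pyPopcount m % 2 = 1 ∧ k ≠ start) := by
                rintro ⟨-, -, h⟩
                exact h hks
              rw [if_neg hg1, if_pos (Or.inl hks)]
            · have hg : ¬(k = start ∨ ¬ m.testBit k = true) := by
                rintro (h | h)
                · exact hks h
                · exact h hbk
              rw [if_pos ⟨hpcc.1, hpcc.2, hks⟩, if_neg hg]
      · have hbk' : m.testBit k = false := by simpa using hbk
        rw [if_pos hbk]
        refine Prod.ext ?_ ?_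
        · show dpMid T start m k = dpMid T start m (k + 1)
          exact (dpMid_succ_nobit T start m k hbk').symm
        · show _ = stepLastB T T.length start m _ _ k
          unfold stepLastB
          rw [if_pos (Or.inr hbk)]
    · rw [if_neg hpcc, if_neg hpcc, stepLastA_apply, hcnt]
      by_cases hbk : m.testBit k = true
      · rw [if_neg (not_not_intro hbk)]
        by_cases hc0 : cpB T T.length start m k = 0
        · rw [if_pos hc0]
          refine Prod.ext ?_ rfl
          show dpMid T start m k = dpMid T start m (k + 1)
          exact (dpMid_succ_zero T start m k hc0).symm
        · rw [if_neg hc0]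
          refine Prod.ext ?_ ?_
          · show (if pyPopcount m < T.length then
                (List.range' (start + 1) (T.length - (start + 1))).foldl
                  (stepNxtA T m k (cpB T T.length start m k)) (dpMid T start m k)
              else dpMid T start m k) = dpMid T start m (k + 1)
            exact dpExt T start m k hbk
          · show (if 3 ≤ pyPopcount m ∧ pyPopcount m % 2 = 1 ∧ k ≠ start then _ else _) = res
            have hg1 : ¬(3 ≤ pyPopcount m ∧ pyPopcount m % 2 = 1 ∧ k ≠ start) := by
              rintro ⟨h1, h2, -⟩
              exact hpcc ⟨h1, h2⟩
            rw [if_neg hg1]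
      · rw [if_pos hbk]
        refine Prod.ext ?_ rfl
        show dpMid T start m k = dpMid T start m (k + 1)
        exact (dpMid_succ_nobit T start m k (by simpa using hbk)).symm

theorem dpMid_full (T : List (List Int)) (start m : Nat) (hb : m.testBit start = true)
    (hmod : m % 2 ^ start = 0) (hm : m < 2 ^ T.length) :
    dpMid T start m T.length = dpAt T start (m + 1) := by
  funext mask2 v
  simp only [dpMid, dpAt]
  by_cases hc : mask2 < 2 ^ T.length ∧ v < T.length ∧ start < v ∧ mask2.testBit v = true ∧
        (mask2 ^^^ 2 ^ v).testBit start = true ∧ (mask2 ^^^ 2 ^ v) % 2 ^ start = 0 ∧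
        mask2 ^^^ 2 ^ v < m + 1
  · obtain ⟨c1, c2, c3, c4, c5, c6, c7⟩ := hc
    by_cases hpred : mask2 ^^^ 2 ^ v = m
    · have hbv : m.testBit v = false := by
        have h := congrArg (fun x => Nat.testBit x v) hpred
        simp only [Nat.testBit_xor, Nat.testBit_two_pow, decide_true, c4] at h
        simpa using h.symm
      have hm2 : mask2 = m ||| 2 ^ v := by
        rw [← hpred, xor_or_cancel c4]
      have hpc : pyPopcount m < T.length := pyPopcount_lt hm c2 hbv
      have hC1 : pyPopcount m < T.length ∧ start < v ∧ v < T.length ∧ m.testBit v = false ∧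
        mask2 = m ||| 2 ^ v := ⟨hpc, c3, c2, hbv, hm2⟩
      rw [if_pos hC1]
      have hnot : ¬(mask2 < 2 ^ T.length ∧ v < T.length ∧ start < v ∧ mask2.testBit v = true ∧
        (mask2 ^^^ 2 ^ v).testBit start = true ∧ (mask2 ^^^ 2 ^ v) % 2 ^ start = 0 ∧
        mask2 ^^^ 2 ^ v < m) := by
        rintro ⟨-, -, -, -, -, -, h7⟩
        omega
      have hfull : mask2 < 2 ^ T.length ∧ v < T.length ∧ start < v ∧ mask2.testBit v = true ∧
          (mask2 ^^^ 2 ^ v).testBit start = true ∧ (mask2 ^^^ 2 ^ v) % 2 ^ start = 0 ∧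
          mask2 ^^^ 2 ^ v < m + 1 := ⟨c1, c2, c3, c4, c5, c6, c7⟩
      rw [if_neg hnot, if_pos hfull, hpred]
      ring
    · have c7' : mask2 ^^^ 2 ^ v < m := by omega
      have hC1 : ¬(pyPopcount m < T.length ∧ start < v ∧ v < T.length ∧ m.testBit v = false ∧
        mask2 = m ||| 2 ^ v) := by
        rintro ⟨-, -, -, hb5, he⟩
        exact hpred (by rw [he, or_xor_cancel hb5])
      have hfull : mask2 < 2 ^ T.length ∧ v < T.length ∧ start < v ∧ mask2.testBit v = true ∧
          (mask2 ^^^ 2 ^ v).testBit start = true ∧ (mask2 ^^^ 2 ^ v) % 2 ^ start = 0 ∧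
          mask2 ^^^ 2 ^ v < m + 1 := ⟨c1, c2, c3, c4, c5, c6, c7⟩
      have hpart : mask2 < 2 ^ T.length ∧ v < T.length ∧ start < v ∧ mask2.testBit v = true ∧
          (mask2 ^^^ 2 ^ v).testBit start = true ∧ (mask2 ^^^ 2 ^ v) % 2 ^ start = 0 ∧
          mask2 ^^^ 2 ^ v < m := ⟨c1, c2, c3, c4, c5, c6, c7'⟩
      rw [if_neg hC1, if_pos hpart, if_pos hfull]
      ring
  · have hcm : ¬(mask2 < 2 ^ T.length ∧ v < T.length ∧ start < v ∧ mask2.testBit v = true ∧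
        (mask2 ^^^ 2 ^ v).testBit start = true ∧ (mask2 ^^^ 2 ^ v) % 2 ^ start = 0 ∧
        mask2 ^^^ 2 ^ v < m) := by
      rintro ⟨c1, c2, c3, c4, c5, c6, c7⟩
      exact hc ⟨c1, c2, c3, c4, c5, c6, by omega⟩
    have hC1 : ¬(pyPopcount m < T.length ∧ start < v ∧ v < T.length ∧ m.testBit v = false ∧
        mask2 = m ||| 2 ^ v) := by
      rintro ⟨hpc, c3, c2, hb5, he⟩
      apply hc
      have hb4 : mask2.testBit v = true := by
        rw [he]
        exact or_bit_self
      have hpred : mask2 ^^^ 2 ^ v = m := by rw [he, or_xor_cancel hb5]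
      refine ⟨?_, c2, c3, hb4, ?_, ?_, ?_⟩
      · rw [he]
        exact Nat.or_lt_two_pow hm (Nat.pow_lt_pow_right (by omega) c2)
      · rw [hpred]
        exact hb
      · rw [hpred]
        exact hmod
      · rw [hpred]
        omega
    rw [if_neg hC1, if_neg hcm, if_neg hc, add_zero]

theorem stepMask_eq (T : List (List Int)) (start m : Nat) (hm : m < 2 ^ T.length)
    (res : List (List Int)) :
    stepMaskA T T.length start (dpAt T start m, res) m
      = (dpAt T start (m + 1), stepMaskB T T.length start res m) := by
  unfold stepMaskA stepMaskB
  by_cases hb : m.testBit start = true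
  · by_cases hmod : m % 2 ^ start = 0
    · rw [if_neg (not_not_intro hb), if_neg (not_not_intro hmod),
        if_neg (by simp [hb, hmod] : ¬(¬ m.testBit start = true ∨ m % 2 ^ start ≠ 0))]
      rw [innerFold T start m hb hmod hm res T.length le_rfl,
        dpMid_full T start m hb hmod hm]
      refine Prod.ext rfl ?_
      show (if 3 ≤ pyPopcount m ∧ pyPopcount m % 2 = 1 then _ else res)
        = (if pyPopcount m < 3 ∨ pyPopcount m % 2 = 0 then res else _)
      by_cases hpcc : 3 ≤ pyPopcount m ∧ pyPopcount m % 2 = 1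
      · rw [if_pos hpcc, if_neg (by omega : ¬(pyPopcount m < 3 ∨ pyPopcount m % 2 = 0))]
      · have h1 : pyPopcount m < 3 ∨ pyPopcount m % 2 = 0 := by
          by_contra h2
          push_neg at h2
          exact hpcc ⟨by omega, by omega⟩
        rw [if_neg hpcc, if_pos h1]
    · have hstep : dpAt T start (m + 1) = dpAt T start m := by
        funext mask2 v
        simp only [dpAt]
        by_cases hcc : mask2 < 2 ^ T.length ∧ v < T.length ∧ start < v ∧ mask2.testBit v = true ∧
        (mask2 ^^^ 2 ^ v).testBit start = true ∧ (mask2 ^^^ 2 ^ v) % 2 ^ start = 0 ∧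
        mask2 ^^^ 2 ^ v < m
        · obtain ⟨c1, c2, c3, c4, c5, c6, c7⟩ := hcc
          rw [if_pos (⟨c1, c2, c3, c4, c5, c6, by omega⟩ : mask2 < 2 ^ T.length ∧ v < T.length ∧ start < v ∧ mask2.testBit v = true ∧
        (mask2 ^^^ 2 ^ v).testBit start = true ∧ (mask2 ^^^ 2 ^ v) % 2 ^ start = 0 ∧
        mask2 ^^^ 2 ^ v < m + 1),
            if_pos (⟨c1, c2, c3, c4, c5, c6, c7⟩ : mask2 < 2 ^ T.length ∧ v < T.length ∧ start < v ∧ mask2.testBit v = true ∧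
        (mask2 ^^^ 2 ^ v).testBit start = true ∧ (mask2 ^^^ 2 ^ v) % 2 ^ start = 0 ∧
        mask2 ^^^ 2 ^ v < m)]
        · have hcc2 : ¬(mask2 < 2 ^ T.length ∧ v < T.length ∧ start < v ∧ mask2.testBit v = true ∧
        (mask2 ^^^ 2 ^ v).testBit start = true ∧ (mask2 ^^^ 2 ^ v) % 2 ^ start = 0 ∧
        mask2 ^^^ 2 ^ v < m + 1) := by
            rintro ⟨c1, c2, c3, c4, c5, c6, c7⟩
            have hne : mask2 ^^^ 2 ^ v ≠ m := by
              intro he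
              rw [he] at c6
              exact hmod c6
            exact hcc ⟨c1, c2, c3, c4, c5, c6, by omega⟩
          rw [if_neg hcc2, if_neg hcc]
      rw [hstep, if_neg (not_not_intro hb), if_pos hmod, if_pos (Or.inr hmod)]
  · have hb' : ¬ m.testBit start = true := hb
    have hstep : dpAt T start (m + 1) = dpAt T start m := by
      funext mask2 v
      simp only [dpAt]
      by_cases hcc : mask2 < 2 ^ T.length ∧ v < T.length ∧ start < v ∧ mask2.testBit v = true ∧
        (mask2 ^^^ 2 ^ v).testBit start = true ∧ (mask2 ^^^ 2 ^ v) % 2 ^ start = 0 ∧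
        mask2 ^^^ 2 ^ v < m
      · obtain ⟨c1, c2, c3, c4, c5, c6, c7⟩ := hcc
        rw [if_pos (⟨c1, c2, c3, c4, c5, c6, by omega⟩ : mask2 < 2 ^ T.length ∧ v < T.length ∧ start < v ∧ mask2.testBit v = true ∧
        (mask2 ^^^ 2 ^ v).testBit start = true ∧ (mask2 ^^^ 2 ^ v) % 2 ^ start = 0 ∧
        mask2 ^^^ 2 ^ v < m + 1),
          if_pos (⟨c1, c2, c3, c4, c5, c6, c7⟩ : mask2 < 2 ^ T.length ∧ v < T.length ∧ start < v ∧ mask2.testBit v = true ∧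
        (mask2 ^^^ 2 ^ v).testBit start = true ∧ (mask2 ^^^ 2 ^ v) % 2 ^ start = 0 ∧
        mask2 ^^^ 2 ^ v < m)]
      · have hcc2 : ¬(mask2 < 2 ^ T.length ∧ v < T.length ∧ start < v ∧ mask2.testBit v = true ∧
        (mask2 ^^^ 2 ^ v).testBit start = true ∧ (mask2 ^^^ 2 ^ v) % 2 ^ start = 0 ∧
        mask2 ^^^ 2 ^ v < m + 1) := by
          rintro ⟨c1, c2, c3, c4, c5, c6, c7⟩
          have hne : mask2 ^^^ 2 ^ v ≠ m := by
            intro he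
            rw [he] at c5
            exact hb c5
          exact hcc ⟨c1, c2, c3, c4, c5, c6, by omega⟩
        rw [if_neg hcc2, if_neg hcc]
    rw [hstep, if_pos hb', if_pos (Or.inl hb')]

theorem maskFold (T : List (List Int)) (start : Nat) :
    ∀ (len m0 : Nat) (res : List (List Int)), m0 + len ≤ 2 ^ T.length →
      (List.range' m0 len).foldl (stepMaskA T T.length start) (dpAt T start m0, res)
        = (dpAt T start (m0 + len),
           (List.range' m0 len).foldl (stepMaskB T T.length start) res) := by
  intro len
  induction len with
  | zero =>
    intro m0 res h
    simp
  | succ len ih =>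
    intro m0 res h
    rw [List.range'_succ, List.foldl_cons, List.foldl_cons,
      stepMask_eq T start m0 (by omega) res, ih (m0 + 1) (stepMaskB T T.length start res m0)
        (by omega)]
    have harith : m0 + 1 + len = m0 + (len + 1) := by omega
    rw [harith]

theorem body_eq (T : List (List Int)) (start : Nat) (res : List (List Int)) :
    ((List.range' (2 ^ start) (2 ^ T.length - 2 ^ start)).foldl (stepMaskA T T.length start)
        ((fun mask v => if mask = 2 ^ start ∧ v = start then 1 else (0 : Int)), res)).2
      = (List.range' (2 ^ start) (2 ^ T.length - 2 ^ start)).foldl (stepMaskB T T.length start)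
          res := by
  have h0 : (fun mask v => if mask = 2 ^ start ∧ v = start then (1 : Int) else 0)
      = dpAt T start (2 ^ start) := by
    funext mask2 v
    simp only [dpAt]
    have hno : ¬(mask2 < 2 ^ T.length ∧ v < T.length ∧ start < v ∧ mask2.testBit v = true ∧
        (mask2 ^^^ 2 ^ v).testBit start = true ∧ (mask2 ^^^ 2 ^ v) % 2 ^ start = 0 ∧
        mask2 ^^^ 2 ^ v < 2 ^ start) := by
      rintro ⟨-, -, -, -, c5, -, c7⟩
      have := testBit_le c5
      omega
    rw [if_neg hno, add_zero]
  by_cases hle : 2 ^ start ≤ 2 ^ T.length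
  · rw [h0, maskFold T start (2 ^ T.length - 2 ^ start) (2 ^ start) res (by omega)]
  · have hz : 2 ^ T.length - 2 ^ start = 0 := by omega
    rw [hz]
    rfl

theorem foldl_fun_congr {α β : Type} (f g : β → α → β) (h : ∀ b a, f b a = g b a) :
    ∀ (l : List α) (i : β), l.foldl f i = l.foldl g i := by
  intro l
  induction l with
  | nil => intro i; rfl
  | cons a t ih =>
    intro i
    rw [List.foldl_cons, List.foldl_cons, h, ih]

-- ===== VERDICT (by name: the statement is the Claim_ definition above) =====
theorem find_odd_cycles_dp_spec : Claim_equal_find_odd_cycles_dp := by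
  intro T _ _
  unfold Spec_find_odd_cycles_dp find_odd_cycles_dp find_odd_cycles_dp_alt
  exact foldl_fun_congr _ _ (fun res start => body_eq T start res) (List.range T.length) []
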